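-- pv_equiv track=rewrite | github.com/augustelalande/dynamic-connect-3 | utils/state.py | __can_complete
-- ===== SOURCE A (Python) =====
-- def __can_complete(run, options, avoid, run_type, n=5, m=4):
--     missing_cells = __get_missing_cells(run, run_type, n, m)
--     can_complete = False
--     for mc in missing_cells:
--         if mc in avoid: continue
--         for nc in __get_neighbor_cells(mc, n, m):
--             if nc in avoid:
--                 return False
--             if not can_complete and nc in options:
--                 can_complete = True
--     return can_complete
--
-- def __get_missing_cells(run, run_type, n=5, m=4):
--     missing_cells = []
--     if run_type == 'r':
--         missing_cells.append((run[0][0] - 1, run[0][1]))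
--         missing_cells.append((run[1][0] + 1, run[1][1]))
--     elif run_type == 'c':
--         missing_cells.append((run[0][0], run[0][1] - 1))
--         missing_cells.append((run[1][0], run[1][1] + 1))
--     elif run_type == 'p':
--         if run[0][0] != 1 and run[0][1] != 1:
--             missing_cells.append((run[0][0] - 1, run[0][1] - 1))
--         if run[1][0] != n and run[1][1] != m:
--             missing_cells.append((run[1][0] + 1, run[1][1] + 1))
--     else:
--         if run[0][0] != n and run[0][1] != 1:
--             missing_cells.append((run[0][0] + 1, run[0][1] - 1))
--         if run[1][0] != 1 and run[1][1] != m: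
--             missing_cells.append((run[1][0] - 1, run[1][1] + 1))
--     return missing_cells
--
-- def __get_neighbor_cells(cell, n=5, m=4):
--     x = cell[0]
--     y = cell[1]
--     ncs = []
--     if y != 1:
--         ncs.append((x, y-1))
--     if x != 1:
--         ncs.append((x-1, y))
--     if x != n:
--         ncs.append((x+1, y))
--     if y != m:
--         ncs.append((x, y+1))
--     return ncs
-- ===== SOURCE B (Python) =====
-- _DIRS = {'r': (1, 0), 'c': (0, 1), 'p': (1, 1)}
--
--
-- def __can_complete(run, options, avoid, run_type, n=5, m=4):
--     # Direction-vector form of the run extension, then inverted iteration: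
--     # instead of generating neighbor cells and testing membership, scan the
--     # avoid/options lists and test grid-adjacency arithmetically.
--     dx, dy = _DIRS.get(run_type, (-1, 1))
--     (x0, y0), (x1, y1) = run[0], run[1]
--     diag = dx != 0 and dy != 0
--     cells = []
--     if not diag or (x0 != (1 if dx == 1 else n) and y0 != 1):
--         cells.append((x0 - dx, y0 - dy))
--     if not diag or (x1 != (n if dx == 1 else 1) and y1 != m):
--         cells.append((x1 + dx, y1 + dy))
--     valid = [c for c in cells if c not in avoid]
--
--     def touches(c):
--         x, y = c
--         return any((x == mx and ((y == my - 1 and y != 0) or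
--                                  (y == my + 1 and y != m + 1))) or
--                    (y == my and ((x == mx - 1 and x != 0) or
--                                  (x == mx + 1 and x != n + 1)))
--                    for mx, my in valid)
--
--     if any(touches(a) for a in avoid):
--         return False
--     return any(touches(o) for o in options)
-- ===== Notes on version B (the rewrite author's own statement) =====
-- stated objective: alternative
-- what changed: B never builds neighbor lists: it derives the two extension cells from a direction-vector table instead of A's four-way branch, and inverts the iteration, scanning the avoid and options lists and testing grid-adjacency to a valid extension cell arithmetically, where A generates each cell's neighbor list and does membership tests inside one interleaved loop with a mutable flag and early return.
import Mathlib
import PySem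

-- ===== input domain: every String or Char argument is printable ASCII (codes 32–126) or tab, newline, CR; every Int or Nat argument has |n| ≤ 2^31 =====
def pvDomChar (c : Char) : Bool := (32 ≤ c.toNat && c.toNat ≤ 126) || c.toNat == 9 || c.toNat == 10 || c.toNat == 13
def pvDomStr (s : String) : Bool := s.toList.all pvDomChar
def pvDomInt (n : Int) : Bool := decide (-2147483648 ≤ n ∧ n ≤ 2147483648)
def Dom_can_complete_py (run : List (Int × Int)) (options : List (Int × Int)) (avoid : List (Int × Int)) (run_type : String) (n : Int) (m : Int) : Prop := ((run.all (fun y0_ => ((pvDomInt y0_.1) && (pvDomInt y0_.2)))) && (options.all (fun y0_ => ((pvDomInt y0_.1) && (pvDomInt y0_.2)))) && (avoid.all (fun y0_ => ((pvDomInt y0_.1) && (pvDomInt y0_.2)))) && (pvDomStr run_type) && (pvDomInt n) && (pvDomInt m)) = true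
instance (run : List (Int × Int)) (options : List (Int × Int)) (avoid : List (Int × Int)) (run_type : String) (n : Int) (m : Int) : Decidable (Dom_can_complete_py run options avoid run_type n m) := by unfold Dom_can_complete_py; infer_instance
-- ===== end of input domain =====

-- B inverts the iteration: a direction-vector table replaces A's four-way branch for the extension
-- cells, and instead of generating neighbor lists and membership-testing them, B scans the avoid and
-- options lists and tests grid-adjacency to a valid extension cell arithmetically.

-- ===== PORT A =====
-- __get_missing_cells, literal: appends to a list branch by branch (run[0]/run[1] are safe under Pre_)
def getMissingCellsA (run : List (Int × Int)) (run_type : String) (n m : Int) : List (Int × Int) :=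
  let r0 := run.getD 0 (0, 0)
  let r1 := run.getD 1 (0, 0)
  if run_type == "r" then
    [(r0.1 - 1, r0.2), (r1.1 + 1, r1.2)]
  else if run_type == "c" then
    [(r0.1, r0.2 - 1), (r1.1, r1.2 + 1)]
  else if run_type == "p" then
    ((if r0.1 != 1 && r0.2 != 1 then [(r0.1 - 1, r0.2 - 1)] else []) ++
     (if r1.1 != n && r1.2 != m then [(r1.1 + 1, r1.2 + 1)] else []))
  else
    ((if r0.1 != n && r0.2 != 1 then [(r0.1 + 1, r0.2 - 1)] else []) ++
     (if r1.1 != 1 && r1.2 != m then [(r1.1 - 1, r1.2 + 1)] else []))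

-- __get_neighbor_cells, literal: four guarded appends
def getNeighborCellsA (cell : Int × Int) (n m : Int) : List (Int × Int) :=
  let x := cell.1
  let y := cell.2
  ((if y != 1 then [(x, y - 1)] else []) ++
   (if x != 1 then [(x - 1, y)] else []) ++
   (if x != n then [(x + 1, y)] else []) ++
   (if y != m then [(x, y + 1)] else []))

-- inner 'for nc' loop; `none` = the early `return False`, `some flag` = loop finished
def innerLoopA (options avoid : List (Int × Int)) : List (Int × Int) → Bool → Option Bool
  | [], flag => some flag
  | nc :: rest, flag =>
    if avoid.contains nc then none
    else innerLoopA options avoid rest (if !flag && options.contains nc then true else flag)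

-- outer 'for mc' loop carrying the can_complete flag
def outerLoopA (options avoid : List (Int × Int)) (n m : Int) : List (Int × Int) → Bool → Bool
  | [], flag => flag
  | mc :: rest, flag =>
    if avoid.contains mc then outerLoopA options avoid n m rest flag
    else
      match innerLoopA options avoid (getNeighborCellsA mc n m) flag with
      | none => false
      | some flag' => outerLoopA options avoid n m rest flag'

def can_complete_py (run : List (Int × Int)) (options : List (Int × Int)) (avoid : List (Int × Int)) (run_type : String) (n : Int) (m : Int) : Bool :=
  outerLoopA options avoid n m (getMissingCellsA run run_type n m) false

-- ===== PORT B =====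
-- the _DIRS module constant
def dirsB : PySem.Dict String (Int × Int) :=
  PySem.Dict.ofList [("r", (1, 0)), ("c", (0, 1)), ("p", (1, 1))]

-- the nested `touches` predicate: c is a (boundary-respecting) grid neighbor of some valid cell
def touchesB (valid : List (Int × Int)) (n m : Int) (c : Int × Int) : Bool :=
  valid.any (fun mc =>
    (c.1 == mc.1 && ((c.2 == mc.2 - 1 && c.2 != 0) || (c.2 == mc.2 + 1 && c.2 != m + 1))) ||
    (c.2 == mc.2 && ((c.1 == mc.1 - 1 && c.1 != 0) || (c.1 == mc.1 + 1 && c.1 != n + 1))))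

def can_complete_py_alt (run : List (Int × Int)) (options : List (Int × Int)) (avoid : List (Int × Int)) (run_type : String) (n : Int) (m : Int) : Bool :=
  let d := PySem.Dict.getD dirsB run_type (-1, 1)
  let dx := d.1
  let dy := d.2
  let r0 := run.getD 0 (0, 0)
  let r1 := run.getD 1 (0, 0)
  let diag := dx != 0 && dy != 0
  let cells :=
    (if !diag || (r0.1 != (if dx == 1 then 1 else n) && r0.2 != 1) then [(r0.1 - dx, r0.2 - dy)] else []) ++
    (if !diag || (r1.1 != (if dx == 1 then n else 1) && r1.2 != m) then [(r1.1 + dx, r1.2 + dy)] else [])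
  let valid := cells.filter (fun c => !(avoid.contains c))
  if avoid.any (fun a => touchesB valid n m a) then false
  else options.any (fun o => touchesB valid n m o)

-- ===== PRECONDITION & SPEC =====
-- Pre_ excludes only inputs where A raises IndexError (run[0]/run[1] need at least two run cells)
def Pre_can_complete_py (run : List (Int × Int)) (options : List (Int × Int)) (avoid : List (Int × Int)) (run_type : String) (n : Int) (m : Int) : Prop := 2 ≤ run.length
instance (run : List (Int × Int)) (options : List (Int × Int)) (avoid : List (Int × Int)) (run_type : String) (n : Int) (m : Int) : Decidable (Pre_can_complete_py run options avoid run_type n m) := by unfold Pre_can_complete_py; infer_instance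
def pvWitness_can_complete_py : (List (Int × Int)) × (List (Int × Int)) × (List (Int × Int)) × String × Int × Int := ([(2, 2), (3, 2)], [(1, 2)], [(4, 2)], "r", 5, 4)
def Spec_can_complete_py (run : List (Int × Int)) (options : List (Int × Int)) (avoid : List (Int × Int)) (run_type : String) (n : Int) (m : Int) (out : Bool) : Prop := out = can_complete_py_alt run options avoid run_type n m
instance (run : List (Int × Int)) (options : List (Int × Int)) (avoid : List (Int × Int)) (run_type : String) (n : Int) (m : Int) (out : Bool) : Decidable (Spec_can_complete_py run options avoid run_type n m out) := by unfold Spec_can_complete_py; infer_instance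

-- ===== CLAIM (what is proved, stated in full; the proofs are below) =====
def Claim_equal_can_complete_py : Prop := ∀ (run : List (Int × Int)) (options : List (Int × Int)) (avoid : List (Int × Int)) (run_type : String) (n : Int) (m : Int), Dom_can_complete_py run options avoid run_type n m → Pre_can_complete_py run options avoid run_type n m → Spec_can_complete_py run options avoid run_type n m (can_complete_py run options avoid run_type n m)

-- ===== LEMMAS AND PROOFS =====

-- A's flag/early-return loops compute an order-independent double `any`
theorem innerLoopA_eq (options avoid : List (Int × Int)) (ncs : List (Int × Int)) (flag : Bool) :
    innerLoopA options avoid ncs flag =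
      (if ncs.any (fun nc => avoid.contains nc) then none
       else some (flag || ncs.any (fun nc => options.contains nc))) := by
  induction ncs generalizing flag with
  | nil => simp [innerLoopA]
  | cons nc rest ih =>
    simp only [innerLoopA, List.any_cons]
    cases hav : avoid.contains nc with
    | true => simp [hav]
    | false =>
      simp only [hav, Bool.false_or, Bool.false_eq_true, if_false]
      rw [ih]
      have hf : (if !flag && options.contains nc then true else flag)
          = (flag || options.contains nc) := by
        cases flag <;> cases h : options.contains nc <;> simp [h]
      rw [hf, Bool.or_assoc]

theorem outerLoopA_eq (options avoid : List (Int × Int)) (n m : Int)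
    (mcs : List (Int × Int)) (flag : Bool) :
    outerLoopA options avoid n m mcs flag =
      (if mcs.any (fun mc => !avoid.contains mc &&
            (getNeighborCellsA mc n m).any (fun nc => avoid.contains nc)) then false
       else flag || mcs.any (fun mc => !avoid.contains mc &&
            (getNeighborCellsA mc n m).any (fun nc => options.contains nc))) := by
  induction mcs generalizing flag with
  | nil => simp [outerLoopA]
  | cons mc rest ih =>
    simp only [outerLoopA, innerLoopA_eq, List.any_cons]
    cases hav : avoid.contains mc with
    | true =>
      simp only [hav, Bool.not_true, Bool.false_and, Bool.false_or, if_true]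
      exact ih flag
    | false =>
      simp only [hav, Bool.not_false, Bool.true_and, Bool.false_eq_true, if_false]
      cases hnb : (getNeighborCellsA mc n m).any (fun nc => avoid.contains nc) with
      | true => simp [hnb]
      | false =>
        simp only [hnb, Bool.false_or, Bool.false_eq_true, if_false]
        rw [ih, Bool.or_assoc]

-- B's extension cells coincide with A's missing cells (table vs branch)
theorem dirsB_mk : dirsB = PySem.Dict.mk [("r", (1, 0)), ("c", (0, 1)), ("p", (1, 1))] := by decide

theorem getD_dirsB_default (s : String) (h1 : s ≠ "r") (h2 : s ≠ "c") (h3 : s ≠ "p") :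
    PySem.Dict.getD dirsB s (-1, 1) = (-1, 1) := by
  rw [dirsB_mk]
  simp [PySem.Dict.getD, PySem.Dict.get?_mk_cons, PySem.Dict.get?,
    beq_eq_false_iff_ne.mpr (fun h => h1 h.symm),
    beq_eq_false_iff_ne.mpr (fun h => h2 h.symm),
    beq_eq_false_iff_ne.mpr (fun h => h3 h.symm)]

theorem cellsB_eq_missingA (run : List (Int × Int)) (run_type : String) (n m : Int) :
    (let d := PySem.Dict.getD dirsB run_type (-1, 1)
     let dx := d.1
     let dy := d.2
     let r0 := run.getD 0 ((0 : Int), (0 : Int))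
     let r1 := run.getD 1 ((0 : Int), (0 : Int))
     let diag := dx != 0 && dy != 0
     (if !diag || (r0.1 != (if dx == 1 then 1 else n) && r0.2 != 1) then [(r0.1 - dx, r0.2 - dy)] else []) ++
     (if !diag || (r1.1 != (if dx == 1 then n else 1) && r1.2 != m) then [(r1.1 + dx, r1.2 + dy)] else [])) =
    getMissingCellsA run run_type n m := by
  simp only [getMissingCellsA]
  by_cases hr : run_type = "r"
  · subst hr
    have hd : PySem.Dict.getD dirsB "r" (-1, 1) = (1, 0) := by decide
    simp [hd]
  · by_cases hc : run_type = "c"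
    · subst hc
      have hd : PySem.Dict.getD dirsB "c" (-1, 1) = (0, 1) := by decide
      simp [hd, hr]
    · by_cases hp : run_type = "p"
      · subst hp
        have hd : PySem.Dict.getD dirsB "p" (-1, 1) = (1, 1) := by decide
        simp [hd, hr, hc]
      · have hd := getD_dirsB_default run_type hr hc hp
        simp [hd, hr, hc, hp, sub_eq_add_neg]

-- membership in A's neighbor list is B's arithmetic adjacency test
theorem contains_neighborsA (mc c : Int × Int) (n m : Int) :
    (getNeighborCellsA mc n m).contains c =
      ((c.1 == mc.1 && ((c.2 == mc.2 - 1 && c.2 != 0) || (c.2 == mc.2 + 1 && c.2 != m + 1))) ||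
       (c.2 == mc.2 && ((c.1 == mc.1 - 1 && c.1 != 0) || (c.1 == mc.1 + 1 && c.1 != n + 1)))) := by
  obtain ⟨x, y⟩ := mc
  obtain ⟨a, b⟩ := c
  rw [Bool.eq_iff_iff]
  simp only [getNeighborCellsA, List.contains_eq_mem, decide_eq_true_eq,
    List.mem_append, List.mem_ite_nil_right, List.mem_singleton, Prod.mk.injEq, bne_iff_ne,
    ne_eq, Bool.or_eq_true, Bool.and_eq_true, beq_iff_eq]
  omega

-- A's "some valid mc has a neighbor in l" = B's "some cell of l touches a valid mc"
theorem cond_eq (l avoid : List (Int × Int)) (n m : Int) (mcs : List (Int × Int)) :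
    mcs.any (fun mc => !avoid.contains mc && (getNeighborCellsA mc n m).any (fun nc => l.contains nc)) =
      l.any (fun c => touchesB (mcs.filter (fun c => !(avoid.contains c))) n m c) := by
  simp only [touchesB, List.any_filter]
  rw [Bool.eq_iff_iff]
  simp only [List.any_eq_true, Bool.and_eq_true, List.contains_eq_mem, decide_eq_true_eq]
  constructor
  · rintro ⟨mc, hmc, hval, nc, hnbr, hl⟩
    refine ⟨nc, hl, mc, hmc, hval, ?_⟩
    have := contains_neighborsA mc nc n m
    rw [Bool.eq_iff_iff] at this
    simpa only [List.contains_eq_mem, decide_eq_true_eq] using this.mp (by simpa using hnbr)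
  · rintro ⟨c, hl, mc, hmc, hval, hadj⟩
    refine ⟨mc, hmc, hval, c, ?_, hl⟩
    have := contains_neighborsA mc c n m
    rw [Bool.eq_iff_iff] at this
    simpa only [List.contains_eq_mem, decide_eq_true_eq] using this.mpr hadj

-- ===== VERDICT (by name: the statement is the Claim_ definition above) =====
theorem can_complete_py_spec : Claim_equal_can_complete_py := by
  intro run options avoid run_type n m _ _
  unfold Spec_can_complete_py can_complete_py can_complete_py_alt
  rw [outerLoopA_eq]
  simp only [cellsB_eq_missingA, Bool.false_or, cond_eq]
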